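-- pv_equiv track=rewrite | github.com/ikazuchizero/ikazuchizero | RandomdiceCardCalc.py | lowWave
-- ===== SOURCE A (Python) =====
-- def lowWave(wave):
--   list = [1,1,2,1,3] # 変更の可能性
--   card = 0
--   j = 0
--   for i in range(wave):
--     card += list[j]
--     j += 1
--     if j == 5:
--       j = 0
--   return card
-- ===== SOURCE B (Python) =====
-- def lowWave(wave):
--     # Closed form: each full 5-wave cycle of [1,1,2,1,3] adds 8; add the prefix sum of the remainder.
--     if wave <= 0:
--         return 0
--     q, r = divmod(wave, 5)
--     return 8 * q + [0, 1, 2, 4, 5][r]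
-- ===== Notes on version B (the rewrite author's own statement) =====
-- stated objective: faster
-- what changed: Replaces the per-wave loop over the cyclic pattern [1,1,2,1,3] with a closed form: 8 * (wave // 5) plus a precomputed prefix sum of the remainder.
import Mathlib
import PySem

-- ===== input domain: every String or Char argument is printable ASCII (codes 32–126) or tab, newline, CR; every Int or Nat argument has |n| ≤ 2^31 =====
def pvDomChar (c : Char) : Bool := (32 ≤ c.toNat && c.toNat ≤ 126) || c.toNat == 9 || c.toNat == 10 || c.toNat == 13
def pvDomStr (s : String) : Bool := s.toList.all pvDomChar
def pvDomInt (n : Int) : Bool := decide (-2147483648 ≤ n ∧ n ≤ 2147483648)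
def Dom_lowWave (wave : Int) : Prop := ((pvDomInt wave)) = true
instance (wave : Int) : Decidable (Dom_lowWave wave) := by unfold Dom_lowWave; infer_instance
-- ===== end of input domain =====

-- B replaces A's per-wave loop by the O(1) closed form 8*(wave//5) + prefix-sum of the remainder.

-- ===== PORT A =====
-- one loop body: card += list[j]; j += 1; if j == 5: j = 0
-- (j always stays in 0..4, so the index is in range; pyGetD's default is never used)
def lowWaveStep (st : Int × Int) : Int × Int :=
  let card := st.1 + PySem.List.pyGetD ([1, 1, 2, 1, 3] : List Int) st.2 0
  let j := st.2 + 1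
  (card, if j = 5 then 0 else j)

def lowWave (wave : Int) : Int :=
  ((PySem.List.pyRange 0 wave 1).foldl (fun st _i => lowWaveStep st) (0, 0)).1

-- ===== PORT B =====
def lowWave_alt (wave : Int) : Int :=
  if wave ≤ 0 then 0
  else
    8 * PySem.Int.floordiv wave 5
      + PySem.List.pyGetD ([0, 1, 2, 4, 5] : List Int) (PySem.Int.mod wave 5) 0

-- ===== PRECONDITION & SPEC =====
def Spec_lowWave (wave : Int) (out : Int) : Prop := out = lowWave_alt wave
instance (wave : Int) (out : Int) : Decidable (Spec_lowWave wave out) := by unfold Spec_lowWave; infer_instance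

-- ===== CLAIM (what is proved, stated in full; the proofs are below) =====
def Claim_equal_lowWave : Prop := ∀ (wave : Int), Dom_lowWave wave → Spec_lowWave wave (lowWave wave)

-- ===== LEMMAS AND PROOFS =====

-- iterate A's loop body n times (the fold ignores the range element)
def pvRun : Nat → Int × Int → Int × Int
  | 0, st => st
  | n + 1, st => pvRun n (lowWaveStep st)

-- the total A's loop adds in n iterations starting at pattern index j
def pvVal : Nat → Nat → Int
  | 0, _ => 0
  | n + 1, j => PySem.List.pyGetD ([1, 1, 2, 1, 3] : List Int) (j : Int) 0 + pvVal n ((j + 1) % 5)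

theorem pvFoldl_run (l : List Int) (st : Int × Int) :
    l.foldl (fun st _i => lowWaveStep st) st = pvRun l.length st := by
  induction l generalizing st with
  | nil => rfl
  | cons x xs ih => simp [List.foldl, pvRun, ih]

theorem pvStep_eq (card : Int) (j : Nat) (hj : j < 5) :
    lowWaveStep (card, (j : Int)) =
      (card + PySem.List.pyGetD ([1, 1, 2, 1, 3] : List Int) (j : Int) 0, (((j + 1) % 5 : Nat) : Int)) := by
  interval_cases j <;> norm_num [lowWaveStep]

theorem pvRun_fst (n : Nat) : ∀ (card : Int) (j : Nat), j < 5 →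
    (pvRun n (card, (j : Int))).1 = card + pvVal n j := by
  induction n with
  | zero => intro card j _; simp [pvRun, pvVal]
  | succ n ih =>
    intro card j hj
    show (pvRun n (lowWaveStep (card, (j : Int)))).1 = _
    rw [pvStep_eq card j hj, ih _ _ (by omega)]
    simp [pvVal]
    ring

theorem pvVal_add5 (n j : Nat) (hj : j < 5) : pvVal (n + 5) j = 8 + pvVal n j := by
  interval_cases j <;>
    · show pvVal (n + 1 + 1 + 1 + 1 + 1) _ = _
      norm_num [pvVal, PySem.List.pyGetD, PySem.List.pyGet?, PySem.List.pyIdx?,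
        show ((2:Int).toNat = 2) from rfl, show ((3:Int).toNat = 3) from rfl,
        show ((4:Int).toNat = 4) from rfl]
      omega

theorem pvVal_closed (q r : Nat) (hr : r < 5) :
    pvVal (5 * q + r) 0 = 8 * (q : Int) + PySem.List.pyGetD ([0, 1, 2, 4, 5] : List Int) (r : Int) 0 := by
  induction q with
  | zero =>
    simp only [Nat.mul_zero, Nat.zero_add]
    interval_cases r <;> decide
  | succ q ih =>
    have h : 5 * (q + 1) + r = (5 * q + r) + 5 := by ring
    rw [h, pvVal_add5 _ _ (by omega), ih]
    push_cast
    ring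

-- ===== VERDICT (by name: the statement is the Claim_ definition above) =====
theorem lowWave_spec : Claim_equal_lowWave := by
  intro wave _
  unfold Spec_lowWave lowWave lowWave_alt
  by_cases hw : wave ≤ 0
  · rw [PySem.List.pyRange_one_eq_nil (by omega)]
    simp [hw]
  · rw [pvFoldl_run, PySem.List.length_pyRange_one,
      show (wave - 0).toNat = wave.toNat from by omega]
    have h00 := pvRun_fst wave.toNat 0 0 (by omega)
    rw [Nat.cast_zero] at h00
    rw [h00, show wave.toNat = 5 * (wave.toNat / 5) + wave.toNat % 5 from by omega,
      pvVal_closed _ _ (by omega), if_neg hw]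
    have hq : ((wave.toNat / 5 : Nat) : Int) = PySem.Int.floordiv wave 5 := by
      rw [PySem.Int.floordiv_eq_ediv_of_pos (by norm_num)]; omega
    have hr : ((wave.toNat % 5 : Nat) : Int) = PySem.Int.mod wave 5 := by
      rw [PySem.Int.mod_eq_emod_of_pos (by norm_num)]; omega
    rw [hq, hr]
    ring
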